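-- pv_equiv track=rewrite | github.com/stevessr/astrbot_plugin_matrix_adapter | utils/utils.py | strip_reply_fallback
-- ===== SOURCE A (Python) =====
-- def strip_reply_fallback(body: str) -> str:
--     """
--     去除 Matrix 回复的 fallback 内容 (引用文本)
--     通常格式为：
--     > <@user:server> message
--
--     或者
--     > <@user:server>
--     > message
--     """
--     if not body:
--         return ""
--     # 1. 匹配标准 fallback 格式：以 > <@user:id> 开头，可能跨越多行
--     # 匹配模式：
--     # ^> <.*?>.*?\n\n
--     # 或者简单的多行 > 开头的块
--
--     # 常见的 fallback 结构是：
--     # > <@sender:server> original message...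
--     # > ... continued ...
--     #
--     # new message
--
--     # 我们尝试移除所有连续的以 > 开头的行，以及随后的空行
--
--     lines = body.split("\n")
--     # 统计开头的 fallback 行数
--     fallback_line_count = 0
--
--     for line in lines:
--         if line.startswith(">") or (fallback_line_count > 0 and line.strip() == ""):
--             fallback_line_count += 1
--         else:
--             break
--
--     if fallback_line_count > 0:
--         # 移除 fallback 行
--         return "\n".join(lines[fallback_line_count:]).lstrip()
--
--     return body
-- ===== SOURCE B (Python) =====
-- def _after_newline(s):
--     # suffix of s after its first newline, or None if s has no newline
--     i = s.find("\n")
--     return None if i == -1 else s[i + 1:]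
--
--
-- def _line_is_fallback(s):
--     # first line of s starts with '>' or is whitespace-only
--     if s.startswith(">"):
--         return True
--     for ch in s:
--         if ch == "\n":
--             return True
--         if not ch.isspace():
--             return False
--     return True
--
--
-- def strip_reply_fallback(body: str) -> str:
--     # B never splits the string into a line list: it walks the original string,
--     # hopping from newline to newline past the leading fallback block, and
--     # returns the remaining suffix lstripped.
--     if not body.startswith(">"):
--         return body
--     rest = _after_newline(body)
--     while rest is not None and _line_is_fallback(rest):
--         rest = _after_newline(rest)
--     return "" if rest is None else rest.lstrip()
-- ===== Notes on version B (the rewrite author's own statement) =====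
-- stated objective: alternative
-- what changed: A splits the body into a line list, counts leading fallback lines with a stateful loop, then rejoins and lstrips; B never builds a line list: it scans the original string, hopping from newline to newline past the leading quoted/blank block, and returns the remaining suffix lstripped.
import Mathlib
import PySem

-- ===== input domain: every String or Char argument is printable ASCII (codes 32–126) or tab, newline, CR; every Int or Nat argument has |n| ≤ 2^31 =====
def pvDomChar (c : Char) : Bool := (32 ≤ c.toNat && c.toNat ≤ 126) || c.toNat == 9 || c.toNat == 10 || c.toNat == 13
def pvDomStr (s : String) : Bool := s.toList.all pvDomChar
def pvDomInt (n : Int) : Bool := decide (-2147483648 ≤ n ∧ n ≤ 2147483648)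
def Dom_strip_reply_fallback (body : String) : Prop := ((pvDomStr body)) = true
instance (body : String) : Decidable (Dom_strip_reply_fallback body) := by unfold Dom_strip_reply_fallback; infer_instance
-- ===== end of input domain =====

-- B replaces A's split/count/join over a line list by a direct scan of the string
-- that hops past newline-terminated fallback lines (objective: alternative).


-- ===== PORT A =====
-- A's for-loop with break: count leading lines that start with '>' (or, once the
-- count is positive, are whitespace-only).
def aCount : List (List Char) → Nat → Nat
  | [], c => c
  | l :: ls, c =>
    if PySem.Chars.startswith l ['>'] || (decide (c > 0) && (PySem.Chars.strip l == ([] : List Char))) then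
      aCount ls (c + 1)
    else c

def strip_reply_fallback (body : String) : String :=
  if body == "" then ""
  else
    let lines := PySem.Chars.splitOn body.toList ['\n']
    let c := aCount lines 0
    if c > 0 then String.mk (PySem.Chars.lstrip (PySem.Chars.join ['\n'] (lines.drop c)))
    else body

-- ===== PORT B =====
-- suffix after the first newline, none if there is no newline (Python _after_newline)
def afterNewline : List Char → Option (List Char)
  | [] => none
  | c :: cs => if c = '\n' then some cs else afterNewline cs

theorem afterNewline_length_lt : ∀ (s r : List Char), afterNewline s = some r → r.length < s.length := by
  intro s
  induction s with
  | nil => intro r h; simp [afterNewline] at h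
  | cons c cs ih =>
    intro r h
    by_cases hc : c = '\n'
    · simp [afterNewline, hc] at h; subst h; simp
    · simp [afterNewline, hc] at h
      exact Nat.lt_trans (ih r h) (by simp)

-- does the first line of s start with '>' or consist of whitespace only? (Python _line_is_fallback)
def lineIsFallback (s : List Char) : Bool :=
  if PySem.Chars.startswith s ['>'] then true else blankScan s
where
  blankScan : List Char → Bool
  | [] => true
  | c :: cs => if c = '\n' then true else if PySem.Chars.isspace c then blankScan cs else false

-- Python's while loop over rest
def bLoop (rest : List Char) : Option (List Char) :=
  if lineIsFallback rest then
    match h : afterNewline rest with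
    | none => none
    | some r => bLoop r
  else some rest
termination_by rest.length
decreasing_by exact afterNewline_length_lt _ _ h

def strip_reply_fallback_alt (body : String) : String :=
  if !PySem.Str.startswith body ">" then body
  else
    match afterNewline body.toList with
    | none => ""
    | some r =>
      match bLoop r with
      | none => ""
      | some rest => String.mk (PySem.Chars.lstrip rest)

-- ===== PRECONDITION & SPEC =====
def Spec_strip_reply_fallback (body : String) (out : String) : Prop := out = strip_reply_fallback_alt body
instance (body : String) (out : String) : Decidable (Spec_strip_reply_fallback body out) := by unfold Spec_strip_reply_fallback; infer_instance

-- ===== CLAIM (what is proved, stated in full; the proofs are below) =====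
def Claim_equal_strip_reply_fallback : Prop := ∀ (body : String), Dom_strip_reply_fallback body → Spec_strip_reply_fallback body (strip_reply_fallback body)

-- ===== LEMMAS AND PROOFS =====

-- simple single-separator split, the proof's reference model of splitOn … ['\n']
def splitNL : List Char → List (List Char)
  | [] => [[]]
  | c :: cs =>
    if c = '\n' then [] :: splitNL cs
    else
      match splitNL cs with
      | [] => [[c]]
      | l :: ls => (c :: l) :: ls

theorem splitNL_ne_nil (cs : List Char) : splitNL cs ≠ [] := by
  cases cs with
  | nil => simp [splitNL]
  | cons c cs =>
    simp only [splitNL]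
    split
    · simp
    · split <;> simp

def modHead (f : List Char → List Char) : List (List Char) → List (List Char)
  | [] => []
  | l :: ls => f l :: ls

theorem splitOn_go_eq : ∀ (fuel : Nat) (l cur : List Char) (acc : List (List Char)),
    l.length < fuel →
    PySem.Chars.splitOn.go ['\n'] fuel l cur acc = acc.reverse ++ modHead (cur.reverse ++ ·) (splitNL l) := by
  intro fuel
  induction fuel with
  | zero => intro l cur acc h; omega
  | succ fuel ih =>
    intro l cur acc h
    cases l with
    | nil =>
      rw [PySem.Chars.splitOn.go]
      simp [splitNL, modHead]
      omega
    | cons c rest =>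
      rw [PySem.Chars.splitOn.go]
      by_cases hc : c = '\n'
      · subst hc
        have hpre : List.isPrefixOf ['\n'] ('\n' :: rest) = true := by
          simp [List.isPrefixOf]
        simp only [hpre, if_pos, List.length_singleton, List.drop_succ_cons, List.drop_zero]
        rw [ih rest [] _ (by simpa using Nat.lt_of_succ_lt_succ h)]
        have hne := splitNL_ne_nil rest
        cases hsr : splitNL rest with
        | nil => exact absurd hsr hne
        | cons a as => simp [splitNL, hsr, modHead]
      · have hpre : List.isPrefixOf ['\n'] (c :: rest) = false := by
          simp [List.isPrefixOf]
          intro hh; exact absurd hh.symm hc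
        simp only [hpre, Bool.false_eq_true, if_false]
        rw [ih rest (c :: cur) _ (by simpa using Nat.lt_of_succ_lt_succ h)]
        have hne := splitNL_ne_nil rest
        cases hsr : splitNL rest with
        | nil => exact absurd hsr hne
        | cons a as => simp [splitNL, hc, hsr, modHead]

theorem splitOn_eq_splitNL (cs : List Char) : PySem.Chars.splitOn cs ['\n'] = splitNL cs := by
  rw [PySem.Chars.splitOn, splitOn_go_eq (cs.length + 1) cs [] [] (by omega)]
  have hne := splitNL_ne_nil cs
  cases hsr : splitNL cs with
  | nil => exact absurd hsr hne
  | cons a as => simp [modHead]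

-- join undoes splitNL
theorem join_splitNL (cs : List Char) : PySem.Chars.join ['\n'] (splitNL cs) = cs := by
  induction cs with
  | nil => simp [splitNL, PySem.Chars.join_singleton]
  | cons c cs ih =>
    by_cases hc : c = '\n'
    · subst hc
      have hne := splitNL_ne_nil cs
      cases hsr : splitNL cs with
      | nil => exact absurd hsr hne
      | cons a as =>
        rw [hsr] at ih
        simp [splitNL, hsr, PySem.Chars.join_cons_cons, ih]
    · have hne := splitNL_ne_nil cs
      cases hsr : splitNL cs with
      | nil => exact absurd hsr hne
      | cons a as =>
        rw [hsr] at ih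
        cases as with
        | nil => simp [splitNL, hc, hsr, PySem.Chars.join_singleton] at ih ⊢; simp [ih]
        | cons b bs =>
          simp [splitNL, hc, hsr, PySem.Chars.join_cons_cons] at ih ⊢
          simp [ih]

-- first line starts with '>' iff the whole string does
theorem startswith_head_splitNL (cs : List Char) :
    PySem.Chars.startswith (splitNL cs).head! ['>'] = PySem.Chars.startswith cs ['>'] := by
  cases cs with
  | nil => simp [splitNL]
  | cons c cs =>
    by_cases hc : c = '\n'
    · subst hc
      simp [splitNL, PySem.Chars.startswith, List.isPrefixOf]
    · have hne := splitNL_ne_nil cs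
      cases hsr : splitNL cs with
      | nil => exact absurd hsr hne
      | cons a as => simp [splitNL, hc, hsr, PySem.Chars.startswith, List.isPrefixOf]

-- blankScan sees exactly "first line is whitespace-only"
theorem strip_eq_nil_iff (l : List Char) :
    (PySem.Chars.strip l = []) ↔ (∀ x ∈ l, PySem.Chars.isspace x) := by
  simp only [PySem.Chars.strip, PySem.Chars.rstrip, PySem.Chars.lstrip,
    List.reverse_eq_nil_iff, List.dropWhile_eq_nil_iff, List.mem_reverse]
  constructor
  · intro h x hx
    rcases List.mem_append.mp ((List.takeWhile_append_dropWhile (p := PySem.Chars.isspace) (l := l)) ▸ hx) with h1 | h2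
    · exact List.mem_takeWhile_imp h1
    · exact h x h2
  · intro h x hx
    exact h x ((List.dropWhile_sublist _).mem hx)

theorem blankScan_eq_strip_head (cs : List Char) :
    lineIsFallback.blankScan cs = (PySem.Chars.strip (splitNL cs).head! == ([] : List Char)) := by
  induction cs with
  | nil => simp [lineIsFallback.blankScan, splitNL, PySem.Chars.strip, PySem.Chars.lstrip, PySem.Chars.rstrip]
  | cons c cs ih =>
    by_cases hc : c = '\n'
    · subst hc
      simp [lineIsFallback.blankScan, splitNL, PySem.Chars.strip, PySem.Chars.lstrip, PySem.Chars.rstrip]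
    · have hne := splitNL_ne_nil cs
      cases hsr : splitNL cs with
      | nil => exact absurd hsr hne
      | cons a as =>
        rw [hsr] at ih
        simp only [lineIsFallback.blankScan, splitNL, hsr, hc, if_false, List.head!_cons] at ih ⊢
        by_cases hsp : PySem.Chars.isspace c
        · simp only [hsp, if_true, ih]
          rw [Bool.eq_iff_iff]
          simp only [beq_iff_eq, strip_eq_nil_iff]
          constructor
          · intro hall x hx
            rcases List.mem_cons.mp hx with rfl | hx
            · exact hsp
            · exact hall x hx
          · intro hall x hx
            exact hall x (List.mem_cons_of_mem _ hx)
        · simp only [hsp, Bool.false_eq_true, if_false]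
          rw [Bool.eq_iff_iff]
          simp only [beq_iff_eq, strip_eq_nil_iff, Bool.false_eq_true, false_iff]
          intro hall
          exact hsp (hall c List.mem_cons_self)

def predFB (l : List Char) : Bool :=
  PySem.Chars.startswith l ['>'] || (PySem.Chars.strip l == ([] : List Char))

theorem lineIsFallback_eq (cs : List Char) : lineIsFallback cs = predFB (splitNL cs).head! := by
  rw [lineIsFallback, predFB, ← startswith_head_splitNL, ← blankScan_eq_strip_head]
  by_cases h : PySem.Chars.startswith (splitNL cs).head! ['>'] <;> simp [h]

-- afterNewline at the line level
theorem afterNewline_splitNL (cs : List Char) (h t) (hs : splitNL cs = h :: t) :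
    (t = [] ∧ afterNewline cs = none) ∨
    (∃ r, afterNewline cs = some r ∧ splitNL r = t ∧ t ≠ []) := by
  induction cs generalizing h t with
  | nil =>
    simp [splitNL] at hs
    left
    exact ⟨hs.2, rfl⟩
  | cons c cs ih =>
    by_cases hc : c = '\n'
    · subst hc
      simp only [splitNL, if_true, List.cons.injEq] at hs
      right
      exact ⟨cs, by simp [afterNewline], hs.2, hs.2 ▸ splitNL_ne_nil cs⟩
    · have hne := splitNL_ne_nil cs
      cases hsr : splitNL cs with
      | nil => exact absurd hsr hne
      | cons a as =>
        simp only [splitNL, hc, if_false, hsr, List.cons.injEq] at hs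
        rcases ih a as hsr with ⟨h1, h2⟩ | ⟨r, h1, h2, h3⟩
        · left
          exact ⟨hs.2 ▸ h1, by simp [afterNewline, hc, h2]⟩
        · right
          exact ⟨r, by simp [afterNewline, hc, h1], hs.2 ▸ h2, hs.2 ▸ h3⟩

theorem dropWhile_eq_drop_len {α : Type} (p : α → Bool) (l : List α) :
    l.dropWhile p = l.drop (l.takeWhile p).length := by
  induction l with
  | nil => rfl
  | cons a l ih =>
    by_cases hp : p a <;> simp [List.dropWhile, List.takeWhile, hp, ih]

theorem bLoop_eq_aux : ∀ (n : Nat) (r : List Char), r.length ≤ n →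
    bLoop r = (if (splitNL r).dropWhile predFB = [] then none
               else some (PySem.Chars.join ['\n'] ((splitNL r).dropWhile predFB))) := by
  intro n
  induction n with
  | zero =>
    intro r hr
    have hnil : r = [] := List.eq_nil_of_length_eq_zero (Nat.le_zero.mp hr)
    subst hnil
    rw [bLoop]
    have h1 : lineIsFallback [] = true := by
      simp [lineIsFallback, lineIsFallback.blankScan, PySem.Chars.startswith, List.isPrefixOf]
    have h2 : predFB [] = true := by
      simp [predFB, PySem.Chars.startswith, List.isPrefixOf, PySem.Chars.strip,
        PySem.Chars.lstrip, PySem.Chars.rstrip]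
    simp [h1, afterNewline, splitNL, List.dropWhile, h2]
  | succ n ih =>
    intro r hr
    obtain ⟨h, t, hs⟩ : ∃ h t, splitNL r = h :: t := by
      cases hsr : splitNL r with
      | nil => exact absurd hsr (splitNL_ne_nil r)
      | cons a as => exact ⟨a, as, rfl⟩
    have hlf := lineIsFallback_eq r
    rw [hs] at hlf
    simp only [List.head!_cons] at hlf
    rw [bLoop]
    by_cases hp : predFB h
    · rw [hlf, hp]
      simp only [if_true]
      cases hAN : afterNewline r with
      | none =>
        rcases afterNewline_splitNL r h t hs with ⟨ht, han⟩ | ⟨r', han, hsr', htne⟩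
        · subst ht
          simp [hs, List.dropWhile, hp]
        · rw [hAN] at han; exact absurd han (by simp)
      | some r' =>
        rcases afterNewline_splitNL r h t hs with ⟨ht, han⟩ | ⟨r2, han, hsr2, htne⟩
        · rw [hAN] at han; exact absurd han (by simp)
        · rw [hAN] at han
          obtain rfl : r' = r2 := by simpa using han
          show bLoop r' = _
          rw [ih r' (by
            have := afterNewline_length_lt r r' hAN
            omega)]
          rw [hs, hsr2]
          simp [List.dropWhile, hp]
    · rw [hlf]
      simp only [hp, Bool.false_eq_true, if_false]
      rw [hs]
      simp only [List.dropWhile, hp, Bool.false_eq_true]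
      rw [if_neg (by simp)]
      rw [← hs, join_splitNL]

theorem bLoop_eq (r : List Char) :
    bLoop r = (if (splitNL r).dropWhile predFB = [] then none
               else some (PySem.Chars.join ['\n'] ((splitNL r).dropWhile predFB))) :=
  bLoop_eq_aux r.length r (Nat.le_refl _)

theorem aCount_pos (ls : List (List Char)) : ∀ (c : Nat), 0 < c →
    aCount ls c = c + (ls.takeWhile predFB).length := by
  induction ls with
  | nil => intro c hc; simp [aCount, List.takeWhile]
  | cons l ls ih =>
    intro c hc
    have hdec : decide (c > 0) = true := by simpa using hc
    have hcond : (PySem.Chars.startswith l ['>'] || (decide (c > 0) && (PySem.Chars.strip l == ([] : List Char)))) = predFB l := by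
      simp [predFB, hdec]
    rw [aCount, hcond]
    by_cases hp : predFB l
    · rw [if_pos hp, ih (c + 1) (by omega)]
      simp [List.takeWhile, hp]
      omega
    · rw [if_neg (by simp [hp])]
      simp [List.takeWhile, hp]

-- ===== VERDICT (by name: the statement is the Claim_ definition above) =====
theorem strip_reply_fallback_spec : Claim_equal_strip_reply_fallback := by
  intro body _
  show strip_reply_fallback body = strip_reply_fallback_alt body
  rw [strip_reply_fallback, strip_reply_fallback_alt]
  by_cases hb : body = ""
  · subst hb
    simp [PySem.Chars.startswith, List.isPrefixOf]
  · rw [if_neg (by simpa using hb)]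
    have hsw : PySem.Str.startswith body ">" = PySem.Chars.startswith body.toList ['>'] := by
      simp
    obtain ⟨h, t, hs⟩ : ∃ h t, splitNL body.toList = h :: t := by
      cases hsr : splitNL body.toList with
      | nil => exact absurd hsr (splitNL_ne_nil _)
      | cons a as => exact ⟨a, as, rfl⟩
    have hhead := startswith_head_splitNL body.toList
    rw [hs] at hhead
    simp only [List.head!_cons] at hhead
    by_cases hst : PySem.Chars.startswith body.toList ['>']
    · -- fallback path on both sides
      rw [hsw, hst]
      simp only [Bool.not_true, Bool.false_eq_true, if_false]
      have hph : PySem.Chars.startswith h ['>'] = true := hhead.trans hst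
      have hc : aCount (splitNL body.toList) 0 = 1 + (t.takeWhile predFB).length := by
        rw [hs, aCount, if_pos (by simp [hph]), aCount_pos t 1 (by omega)]
      rw [splitOn_eq_splitNL, hc, if_pos (by omega), hs]
      have hdrop : (h :: t).drop (1 + (t.takeWhile predFB).length) = t.dropWhile predFB := by
        rw [dropWhile_eq_drop_len]
        simp [Nat.add_comm]
      rw [hdrop]
      rcases afterNewline_splitNL body.toList h t hs with ⟨ht, han⟩ | ⟨r', han, hsr', htne⟩
      · subst ht
        rw [han]
        simp [List.dropWhile, PySem.Chars.join_nil, PySem.Chars.lstrip]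
        rfl
      · rw [han]
        show _ = (match bLoop r' with
          | none => ""
          | some rest => String.mk (PySem.Chars.lstrip rest))
        rw [bLoop_eq, hsr']
        by_cases hdw : t.dropWhile predFB = []
        · rw [if_pos hdw, hdw]
          simp [PySem.Chars.join_nil, PySem.Chars.lstrip]
          rfl
        · rw [if_neg hdw]
    · -- no fallback: both return body
      rw [hsw, Bool.eq_false_iff.mpr hst]
      simp only [Bool.not_false, if_true]
      have hph : PySem.Chars.startswith h ['>'] = false := hhead.trans (by simpa using hst)
      rw [splitOn_eq_splitNL, hs, aCount, if_neg (by simp [hph])]
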